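-- pv_equiv track=rewrite | github.com/dheerajalim/metaheuristic | Assignment 2/utils.py | positive_gain
-- ===== SOURCE A (Python) =====
-- def positive_gain(sol_list_init, cnf_formula_unsat):
--     positive_gain = []
--     for variable in sol_list_init:
--         variable_count_unsat = 0
--
--         '''Checking for the unsat clauses which contain the required parameter'''
--         for unsat_clause in cnf_formula_unsat:
--             if variable in unsat_clause or (-1 * variable) in unsat_clause:
--                 variable_count_unsat += 1  # Keeping a count of the clauses
--
--         positive_gain.append(variable_count_unsat)
--     return positive_gain
-- ===== SOURCE B (Python) =====
-- def positive_gain(sol_list_init, cnf_formula_unsat):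
--     counts = {}
--     for clause in cnf_formula_unsat:
--         for var in set(map(abs, clause)):
--             counts[var] = counts.get(var, 0) + 1
--     return [counts.get(abs(v), 0) for v in sol_list_init]
-- ===== Notes on version B (the rewrite author's own statement) =====
-- stated objective: faster
-- what changed: Replaces A's per-variable rescan of every clause with one pass that builds a count table keyed by the absolute value of each clause's distinct literals, then a lookup pass over the variables.
import Mathlib
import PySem

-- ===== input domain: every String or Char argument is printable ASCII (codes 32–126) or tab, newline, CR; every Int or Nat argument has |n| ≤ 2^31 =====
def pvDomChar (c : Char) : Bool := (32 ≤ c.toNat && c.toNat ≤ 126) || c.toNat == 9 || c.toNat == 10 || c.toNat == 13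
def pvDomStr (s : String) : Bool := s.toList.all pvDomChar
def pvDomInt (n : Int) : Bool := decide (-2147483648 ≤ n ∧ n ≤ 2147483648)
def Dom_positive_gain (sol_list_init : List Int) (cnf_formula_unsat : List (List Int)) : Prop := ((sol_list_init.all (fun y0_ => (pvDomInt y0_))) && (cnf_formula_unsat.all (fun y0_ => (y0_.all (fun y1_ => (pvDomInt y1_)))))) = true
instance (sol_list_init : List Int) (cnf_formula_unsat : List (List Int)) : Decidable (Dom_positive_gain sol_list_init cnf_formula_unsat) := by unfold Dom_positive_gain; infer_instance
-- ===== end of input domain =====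

-- B replaces A's per-variable rescan of all clauses by one counting pass over the
-- clauses (a dict keyed by the absolute value of each clause's distinct literals)
-- followed by lookups; objective: faster.

-- ===== PORT A =====
def positive_gain (sol_list_init : List Int) (cnf_formula_unsat : List (List Int)) : List Int :=
  sol_list_init.foldl (fun positive_gain variable_ =>
    positive_gain ++ [cnf_formula_unsat.foldl (fun variable_count_unsat unsat_clause =>
      if unsat_clause.contains variable_ || unsat_clause.contains (-1 * variable_) then
        variable_count_unsat + 1
      else variable_count_unsat) (0 : Int)]) []

-- ===== PORT B =====
def positive_gain_alt (sol_list_init : List Int) (cnf_formula_unsat : List (List Int)) : List Int :=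
  let counts : PySem.Dict Int Int :=
    cnf_formula_unsat.foldl (fun counts clause =>
      (PySem.Set.ofList (clause.map (fun x => |x|))).foldl
        (fun counts var => counts.modify var 0 (· + 1)) counts)
      PySem.Dict.empty
  sol_list_init.map (fun v => counts.getD |v| 0)

-- ===== PRECONDITION & SPEC =====
def Spec_positive_gain (sol_list_init : List Int) (cnf_formula_unsat : List (List Int)) (out : List Int) : Prop := out = positive_gain_alt sol_list_init cnf_formula_unsat
instance (sol_list_init : List Int) (cnf_formula_unsat : List (List Int)) (out : List Int) : Decidable (Spec_positive_gain sol_list_init cnf_formula_unsat out) := by unfold Spec_positive_gain; infer_instance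

-- ===== CLAIM (what is proved, stated in full; the proofs are below) =====
def Claim_equal_positive_gain : Prop := ∀ (sol_list_init : List Int) (cnf_formula_unsat : List (List Int)), Dom_positive_gain sol_list_init cnf_formula_unsat → Spec_positive_gain sol_list_init cnf_formula_unsat (positive_gain sol_list_init cnf_formula_unsat)

-- ===== LEMMAS AND PROOFS =====

-- a Nodup list counts any element 0 or 1 times
theorem pv_count_nodup {l : List Int} (h : l.Nodup) (k : Int) :
    l.count k = if k ∈ l then 1 else 0 := by
  split_ifs with hm
  · exact List.count_eq_one_of_mem h hm
  · exact List.count_eq_zero.mpr hm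

-- membership of |v| among the absolute values of a clause = A's test
theorem pv_pred_eq (cl : List Int) (v : Int) :
    (cl.map (fun x => |x|)).contains |v| = (cl.contains v || cl.contains (-1 * v)) := by
  have hiff : |v| ∈ cl.map (fun x => |x|) ↔ v ∈ cl ∨ -1 * v ∈ cl := by
    simp only [List.mem_map]
    constructor
    · rintro ⟨x, hx, hax⟩
      rcases abs_eq_abs.mp hax with h | h
      · exact Or.inl (h ▸ hx)
      · right; have hx' : -1 * v = x := by omega
        exact hx' ▸ hx
    · rintro (h | h)
      · exact ⟨v, h, rfl⟩
      · exact ⟨-1 * v, h, by simp⟩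
  simp only [List.contains_eq_mem, hiff, Bool.decide_or]

-- A's inner loop counts the clauses satisfying the test
theorem pv_inner_count (cnf : List (List Int)) (v : Int) (c : Int) :
    cnf.foldl (fun variable_count_unsat unsat_clause =>
      if unsat_clause.contains v || unsat_clause.contains (-1 * v) then
        variable_count_unsat + 1
      else variable_count_unsat) c
    = c + (cnf.countP (fun cl => cl.contains v || cl.contains (-1 * v)) : Int) := by
  induction cnf generalizing c with
  | nil => simp
  | cons cl rest ih =>
    simp only [List.foldl_cons, List.countP_cons, ih]
    split_ifs with h <;> push_cast <;> ring

-- the count table: lookup at key k counts the clauses whose absolute literals contain k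
theorem pv_dict_count (cnf : List (List Int)) (d : PySem.Dict Int Int) (k : Int) :
    (cnf.foldl (fun counts clause =>
      (PySem.Set.ofList (clause.map (fun x => |x|))).foldl
        (fun counts var => counts.modify var 0 (· + 1)) counts) d).getD k 0
    = d.getD k 0 + (cnf.countP (fun cl => (cl.map (fun x => |x|)).contains k) : Int) := by
  induction cnf generalizing d with
  | nil => simp
  | cons cl rest ih =>
    simp only [List.foldl_cons, ih, PySem.Dict.getD_foldl_modify_add_one,
      List.countP_cons]
    rw [pv_count_nodup (PySem.Set.nodup_ofList _) k]
    have : k ∈ PySem.Set.ofList (cl.map fun x => |x|) ↔ (cl.map fun x => |x|).contains k := by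
      simp [PySem.Set.mem_ofList]
    split_ifs with h₁ h₂ h₂
    · push_cast; ring
    · exact absurd (this.mp h₁) (by simpa using h₂)
    · exact absurd (this.mpr h₂) h₁
    · push_cast; ring

-- folding with append-of-singleton is map
theorem pv_foldl_append_map (sol : List Int) (f : Int → Int) (acc : List Int) :
    sol.foldl (fun acc v => acc ++ [f v]) acc = acc ++ sol.map f := by
  induction sol generalizing acc with
  | nil => simp
  | cons v rest ih => simp [ih]

-- ===== VERDICT (by name: the statement is the Claim_ definition above) =====
theorem positive_gain_spec : Claim_equal_positive_gain := by
  intro sol cnf _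
  unfold Spec_positive_gain positive_gain positive_gain_alt
  rw [pv_foldl_append_map, List.nil_append]
  apply List.map_congr_left
  intro v _
  rw [pv_inner_count, pv_dict_count]
  simp only [PySem.Dict.getD_empty, zero_add]
  congr 1
  apply List.countP_congr
  intro cl _
  rw [pv_pred_eq]
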